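-- pv_equiv track=rewrite | github.com/jschipp-r7/r7cli | matrix.py | apply_reductions
-- ===== SOURCE A (Python) =====
-- def apply_reductions(
--     mapping: dict[tuple[str, str], list[tuple[str, int]] | None],
--     reductions: list[tuple[str, str | None, int]],
-- ) -> dict[tuple[str, str], list[tuple[str, int]] | None]:
--     """Apply deployment reductions to a cell-percent mapping.
--
--     Returns a new mapping with adjusted percentages.  Product-level
--     contributions are floored at 0.
--     """
--     adjusted: dict[tuple[str, str], list[tuple[str, int]] | None] = {}
--     for (stage, asset_type), entries in mapping.items():
--         if entries is None:
--             adjusted[(stage, asset_type)] = None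
--             continue
--         new_entries: list[tuple[str, int]] = []
--         for product, pct in entries:
--             total_reduction = 0
--             for r_product, r_stage, r_amount in reductions:
--                 if r_product == product and (r_stage is None or r_stage == stage):
--                     total_reduction += r_amount
--             new_entries.append((product, max(0, pct - total_reduction)))
--         adjusted[(stage, asset_type)] = new_entries
--     return adjusted
-- ===== SOURCE B (Python) =====
-- def apply_reductions(
--     mapping: dict[tuple[str, str], list[tuple[str, int]] | None],
--     reductions: list[tuple[str, str | None, int]],
-- ) -> dict[tuple[str, str], list[tuple[str, int]] | None]:
--     """Scatter formulation: one outer pass over reductions, adding amounts into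
--     per-entry running totals in place; the max(0, ..) floor is applied once at the end."""
--     cells = []
--     for (stage, asset_type), entries in mapping.items():
--         if entries is None:
--             cells.append((stage, asset_type, None))
--         else:
--             cells.append((stage, asset_type, (entries, [0] * len(entries))))
--     for r_product, r_stage, r_amount in reductions:
--         for stage, asset_type, payload in cells:
--             if payload is not None and (r_stage is None or r_stage == stage):
--                 es, ts = payload
--                 for i in range(len(es)):
--                     if es[i][0] == r_product:
--                         ts[i] += r_amount
--     return {
--         (stage, asset_type): (None if payload is None else
--                               [(p, max(0, pct - t)) for (p, pct), t in zip(payload[0], payload[1])])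
--         for stage, asset_type, payload in cells
--     }
-- ===== Notes on version B (the rewrite author's own statement) =====
-- stated objective: alternative
-- what changed: Restructured from gather (per-entry inner scan over all reductions) to scatter (single outer pass over reductions adding into per-entry running totals, with the max(0,..) floor applied once at the end).
import Mathlib
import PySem

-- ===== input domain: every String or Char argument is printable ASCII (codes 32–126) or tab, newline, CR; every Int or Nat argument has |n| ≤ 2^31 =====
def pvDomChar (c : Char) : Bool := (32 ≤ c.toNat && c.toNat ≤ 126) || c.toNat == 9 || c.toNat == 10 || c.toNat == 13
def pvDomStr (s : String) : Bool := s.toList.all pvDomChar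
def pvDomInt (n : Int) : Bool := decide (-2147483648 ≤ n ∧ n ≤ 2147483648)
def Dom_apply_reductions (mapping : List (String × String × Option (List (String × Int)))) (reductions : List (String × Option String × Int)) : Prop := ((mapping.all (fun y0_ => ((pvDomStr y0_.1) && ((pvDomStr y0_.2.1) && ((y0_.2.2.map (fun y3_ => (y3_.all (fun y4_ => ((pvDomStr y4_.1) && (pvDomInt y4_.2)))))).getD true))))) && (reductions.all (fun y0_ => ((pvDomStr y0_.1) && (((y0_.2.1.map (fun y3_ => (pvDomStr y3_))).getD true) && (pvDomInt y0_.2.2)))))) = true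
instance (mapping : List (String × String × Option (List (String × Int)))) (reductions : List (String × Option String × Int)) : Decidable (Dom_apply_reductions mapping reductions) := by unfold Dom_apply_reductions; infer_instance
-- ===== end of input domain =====

-- B restructures A's gather (per-entry inner scan over reductions) into a scatter pass over
-- reductions with running per-entry totals; same cost, alternative decomposition.


-- ===== PORT A =====
-- literal port of A: build the `adjusted` dict; per cell, per entry, an inner scan over reductions
def apply_reductions (mapping : List (String × String × Option (List (String × Int)))) (reductions : List (String × Option String × Int)) : List (String × String × Option (List (String × Int))) :=
  (mapping.foldl (fun (adjusted : PySem.Dict (String × String) (Option (List (String × Int)))) cell =>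
      match cell with
      | (stage, asset_type, none) => adjusted.insert (stage, asset_type) none
      | (stage, asset_type, some entries) =>
          adjusted.insert (stage, asset_type)
            (some (entries.foldl (fun new_entries pe =>
              let total_reduction := reductions.foldl (fun acc r =>
                if r.1 = pe.1 ∧ (r.2.1 = none ∨ r.2.1 = some stage) then acc + r.2.2 else acc) 0
              new_entries ++ [(pe.1, max 0 (pe.2 - total_reduction))]) []))
    ) PySem.Dict.empty).items.map (fun p => (p.1.1, p.1.2, p.2))

-- ===== PORT B =====
-- inner accumulation loop of B: for i in range(len(es)): if es[i][0] == pr: ts[i] += am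
def pvInner (pr : String) (am : Int) (es : List (String × Int)) (ts : List Int) : List Int :=
  (PySem.List.pyRange 0 (PySem.List.len es)).foldl
    (fun ts i => if (PySem.List.pyGetD es i ("", 0)).1 = pr
                 then PySem.List.pySetD ts i (PySem.List.pyGetD ts i 0 + am) else ts) ts

-- one scatter step: apply one reduction to one accumulator cell (entries, running totals)
def pvStepCell (r : String × Option String × Int) (c : String × String × Option (List (String × Int) × List Int)) : String × String × Option (List (String × Int) × List Int) :=
  match c with
  | (stage, asset_type, none) => (stage, asset_type, none)
  | (stage, asset_type, some (es, ts)) =>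
      if r.2.1 = none ∨ r.2.1 = some stage then
        (stage, asset_type, some (es, pvInner r.1 r.2.2 es ts))
      else (stage, asset_type, some (es, ts))

def apply_reductions_alt (mapping : List (String × String × Option (List (String × Int)))) (reductions : List (String × Option String × Int)) : List (String × String × Option (List (String × Int))) :=
  let cells := mapping.map (fun c => (c.1, c.2.1, c.2.2.map (fun es => (es, es.map (fun _ => (0 : Int))))))
  let cells2 := reductions.foldl (fun cs r => cs.map (pvStepCell r)) cells
  cells2.map (fun c => (c.1, c.2.1, c.2.2.map (fun p => (p.1.zip p.2).map (fun et => (et.1.1, max 0 (et.1.2 - et.2))))))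

-- ===== PRECONDITION & SPEC =====
-- Pre_ excludes association lists with duplicate (stage, asset_type) keys: those do not represent
-- any Python dict input (Python's dict literal collapses duplicates before A ever runs).
def Pre_apply_reductions (mapping : List (String × String × Option (List (String × Int)))) (reductions : List (String × Option String × Int)) : Prop :=
  (mapping.map (fun c => (c.1, c.2.1))).Nodup
instance (mapping : List (String × String × Option (List (String × Int)))) (reductions : List (String × Option String × Int)) : Decidable (Pre_apply_reductions mapping reductions) := by unfold Pre_apply_reductions; infer_instance
def pvWitness_apply_reductions : (List (String × String × Option (List (String × Int)))) × (List (String × Option String × Int)) :=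
  ([("dev", "vm", some [("p", 50), ("q", 30)]), ("prod", "vm", none)], [("p", some "dev", 10), ("p", none, 5)])

def Spec_apply_reductions (mapping : List (String × String × Option (List (String × Int)))) (reductions : List (String × Option String × Int)) (out : List (String × String × Option (List (String × Int)))) : Prop := out = apply_reductions_alt mapping reductions
instance (mapping : List (String × String × Option (List (String × Int)))) (reductions : List (String × Option String × Int)) (out : List (String × String × Option (List (String × Int)))) : Decidable (Spec_apply_reductions mapping reductions out) := by unfold Spec_apply_reductions; infer_instance

-- ===== CLAIM (what is proved, stated in full; the proofs are below) =====
def Claim_equal_apply_reductions : Prop := ∀ (mapping : List (String × String × Option (List (String × Int)))) (reductions : List (String × Option String × Int)), Dom_apply_reductions mapping reductions → Pre_apply_reductions mapping reductions → Spec_apply_reductions mapping reductions (apply_reductions mapping reductions)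

-- ===== LEMMAS AND PROOFS =====

-- sum of the matching reduction amounts for one entry (proof-side characterisation)
def pvTotal (stage product : String) (reductions : List (String × Option String × Int)) : Int :=
  (reductions.map (fun r => if r.1 = product ∧ (r.2.1 = none ∨ r.2.1 = some stage) then r.2.2 else 0)).sum

lemma pv_foldl_if_total (stage product : String) (rs : List (String × Option String × Int)) :
    ∀ c : Int, rs.foldl (fun acc r =>
      if r.1 = product ∧ (r.2.1 = none ∨ r.2.1 = some stage) then acc + r.2.2 else acc) c
      = c + pvTotal stage product rs := by
  induction rs with
  | nil => intro c; simp [pvTotal]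
  | cons r rs ih =>
      intro c
      simp only [List.foldl_cons, pvTotal, List.map_cons, List.sum_cons]
      rw [ih]
      split_ifs <;> [skip; skip] <;> simp [pvTotal] <;> ring

lemma pv_zip_map {α β : Type} (es : List α) (g : α → Int) (h : α → Int → β) :
    (es.zip (es.map g)).map (fun et => h et.1 et.2) = es.map (fun e => h e (g e)) := by
  induction es with
  | nil => rfl
  | cons e es ih => simp [ih]

-- ts[i] looked up / assigned at an in-range Nat index
lemma pv_getD_append {α : Type} [Inhabited α] (l : List α) (y : α) (ys : List α) (d : α) :
    (l ++ y :: ys).getD l.length d = y := by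
  induction l with
  | nil => rfl
  | cons x xs ih => simpa using ih

lemma pv_set_append {α : Type} (l : List α) (y v : α) (ys : List α) :
    (l ++ y :: ys).set l.length v = l ++ v :: ys := by
  induction l with
  | nil => rfl
  | cons x xs ih => simp [ih]

lemma pv_pySetD_natCast {α : Type} (xs : List α) (n : Nat) (v : α) (h : n < xs.length) :
    PySem.List.pySetD xs (n : Int) v = xs.set n v := by
  simp [PySem.List.pySetD, PySem.List.pySet?, PySem.List.pyIdx?, h]

-- the index-mutation loop of B, characterised entry by entry (generalising over a processed prefix)
lemma pv_inner_aux (pr : String) (am : Int) :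
    ∀ (es2 esPre : List (String × Int)) (pre ts2 : List Int),
      esPre.length = pre.length → ts2.length = es2.length →
      (PySem.List.pyRange (pre.length : Int) ((pre.length : Int) + (es2.length : Int))).foldl
        (fun ts i => if (PySem.List.pyGetD (esPre ++ es2) i ("", 0)).1 = pr
                     then PySem.List.pySetD ts i (PySem.List.pyGetD ts i 0 + am) else ts)
        (pre ++ ts2)
      = pre ++ (es2.zip ts2).map (fun et => if et.1.1 = pr then et.2 + am else et.2) := by
  intro es2
  induction es2 with
  | nil =>
      intro esPre pre ts2 _ hl
      have : ts2 = [] := List.length_eq_zero_iff.mp (by simpa using hl)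
      subst this
      simp [PySem.List.pyRange]
  | cons e es2 ih =>
      intro esPre pre ts2 hpre hl
      obtain ⟨t, ts2, rfl⟩ : ∃ t ts2', ts2 = t :: ts2' := by
        cases ts2 with
        | nil => simp at hl
        | cons a b => exact ⟨a, b, rfl⟩
      have hlt : (pre.length : Int) < (pre.length : Int) + ((e :: es2).length : Int) := by
        simp only [List.length_cons]; push_cast; omega
      rw [PySem.List.pyRange_one_cons hlt, List.foldl_cons]
      have hget : PySem.List.pyGetD (esPre ++ e :: es2) (pre.length : Int) ("", 0) = e := by
        rw [PySem.List.pyGetD_natCast, ← hpre, pv_getD_append]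
      have hgett : PySem.List.pyGetD (pre ++ t :: ts2) (pre.length : Int) 0 = t := by
        rw [PySem.List.pyGetD_natCast, pv_getD_append]
      have hset : ∀ v : Int, PySem.List.pySetD (pre ++ t :: ts2) (pre.length : Int) v = pre ++ v :: ts2 := by
        intro v
        rw [pv_pySetD_natCast _ _ _ (by simp), pv_set_append]
      have key : ∀ t' : Int,
          (PySem.List.pyRange ((pre.length : Int) + 1) ((pre.length : Int) + ((e :: es2).length : Int))).foldl
            (fun ts i => if (PySem.List.pyGetD (esPre ++ e :: es2) i ("", 0)).1 = pr
                         then PySem.List.pySetD ts i (PySem.List.pyGetD ts i 0 + am) else ts)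
            (pre ++ t' :: ts2)
          = pre ++ t' :: (es2.zip ts2).map (fun et => if et.1.1 = pr then et.2 + am else et.2) := by
        intro t'
        have h1 : ((pre.length : Int) + 1) = (((pre ++ [t']).length : Nat) : Int) := by simp
        have h2 : ((pre.length : Int) + ((e :: es2).length : Int))
            = (((pre ++ [t']).length : Nat) : Int) + ((es2.length : Nat) : Int) := by
          simp only [List.length_cons, List.length_append, List.length_nil]; push_cast; omega
        have h3 : esPre ++ e :: es2 = (esPre ++ [e]) ++ es2 := by simp
        have h4 : pre ++ t' :: ts2 = (pre ++ [t']) ++ ts2 := by simp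
        rw [h1, h2, h3, h4, ih (esPre ++ [e]) (pre ++ [t']) ts2 (by simp [hpre]) (by simpa using hl)]
        simp
      by_cases hp : e.1 = pr
      · rw [if_pos (by rw [hget]; exact hp)]
        rw [hgett, hset, key]
        simp [hp]
      · rw [if_neg (by rw [hget]; exact hp)]
        rw [key]
        simp [hp]

lemma pvInner_eq (pr : String) (am : Int) (es : List (String × Int)) (ts : List Int)
    (h : ts.length = es.length) :
    pvInner pr am es ts = (es.zip ts).map (fun et => if et.1.1 = pr then et.2 + am else et.2) := by
  have := pv_inner_aux pr am es [] [] ts rfl h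
  simpa [pvInner, PySem.List.len_eq] using this

lemma pv_fold_step_none (rs : List (String × Option String × Int)) (st at_ : String) :
    rs.foldl (fun c r => pvStepCell r c) (st, at_, none) = (st, at_, none) := by
  induction rs with
  | nil => rfl
  | cons r rs ih => simp only [List.foldl_cons, pvStepCell]; exact ih

lemma pv_fold_step_some (rs : List (String × Option String × Int)) (st at_ : String)
    (es : List (String × Int)) :
    ∀ g : (String × Int) → Int,
      rs.foldl (fun c r => pvStepCell r c) (st, at_, some (es, es.map g))
        = (st, at_, some (es, es.map (fun e => g e + pvTotal st e.1 rs))) := by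
  induction rs with
  | nil => intro g; simp [pvTotal]
  | cons r rs ih =>
      intro g
      rw [List.foldl_cons]
      by_cases hst : r.2.1 = none ∨ r.2.1 = some st
      · have hstep : pvStepCell r (st, at_, some (es, es.map g))
            = (st, at_, some (es, es.map (fun e => if e.1 = r.1 then g e + r.2.2 else g e))) := by
          simp only [pvStepCell, if_pos hst]
          rw [pvInner_eq r.1 r.2.2 es (es.map g) (by simp),
            pv_zip_map es g (fun e t => if e.1 = r.1 then t + r.2.2 else t)]
        rw [hstep, ih]
        simp only [Prod.mk.injEq, Option.some.injEq, true_and]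
        apply List.map_congr_left
        intro e _
        simp only [pvTotal, List.map_cons, List.sum_cons]
        by_cases hp : e.1 = r.1
        · simp [hp, hst]; ring
        · have : ¬ (r.1 = e.1 ∧ (r.2.1 = none ∨ r.2.1 = some st)) := by
            intro h; exact hp h.1.symm
          simp [hp, this]
      · have hstep : pvStepCell r (st, at_, some (es, es.map g))
            = (st, at_, some (es, es.map g)) := by
          simp only [pvStepCell, if_neg hst]
        rw [hstep, ih]
        simp only [Prod.mk.injEq, Option.some.injEq, true_and]
        apply List.map_congr_left
        intro e _
        simp only [pvTotal, List.map_cons, List.sum_cons]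
        have : ¬ (r.1 = e.1 ∧ (r.2.1 = none ∨ r.2.1 = some st)) := fun h => hst h.2
        simp [this]

lemma pv_fold_map_comm {C : Type} (step : (String × Option String × Int) → C → C)
    (rs : List (String × Option String × Int)) :
    ∀ cs : List C, rs.foldl (fun cs r => cs.map (step r)) cs
      = cs.map (fun c => rs.foldl (fun c r => step r c) c) := by
  induction rs with
  | nil => intro cs; simp
  | cons r rs ih =>
      intro cs
      simp only [List.foldl_cons]
      rw [ih, List.map_map]
      rfl

-- B's result, cell by cell
lemma pv_alt_eq_map (mapping : List (String × String × Option (List (String × Int)))) (rs : List (String × Option String × Int)) :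
    apply_reductions_alt mapping rs
      = mapping.map (fun c => (c.1, c.2.1,
          c.2.2.map (fun es => es.map (fun e => (e.1, max 0 (e.2 - pvTotal c.1 e.1 rs)))))) := by
  simp only [apply_reductions_alt]
  rw [pv_fold_map_comm pvStepCell rs, List.map_map, List.map_map]
  apply List.map_congr_left
  intro c _
  obtain ⟨st, at_, oe⟩ := c
  cases oe with
  | none => simp [pv_fold_step_none]
  | some es =>
      simp only [Function.comp, Option.map_some]
      rw [pv_fold_step_some rs st at_ es (fun _ => 0)]
      simp only [Option.map_some]
      rw [pv_zip_map es (fun e => 0 + pvTotal st e.1 rs) (fun e t => (e.1, max 0 (e.2 - t)))]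
      simp

-- A's result, cell by cell (uses Pre_: fresh distinct keys make dict inserts append)
lemma pv_a_eq_map (mapping : List (String × String × Option (List (String × Int)))) (rs : List (String × Option String × Int))
    (hnd : (mapping.map (fun c => (c.1, c.2.1))).Nodup) :
    apply_reductions mapping rs
      = mapping.map (fun c => (c.1, c.2.1,
          c.2.2.map (fun es => es.map (fun e => (e.1, max 0 (e.2 - pvTotal c.1 e.1 rs)))))) := by
  unfold apply_reductions
  have hbody : (fun (adjusted : PySem.Dict (String × String) (Option (List (String × Int)))) (cell : String × String × Option (List (String × Int))) =>
      match cell with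
      | (stage, asset_type, none) => adjusted.insert (stage, asset_type) none
      | (stage, asset_type, some entries) =>
          adjusted.insert (stage, asset_type)
            (some (entries.foldl (fun new_entries pe =>
              let total_reduction := rs.foldl (fun acc r =>
                if r.1 = pe.1 ∧ (r.2.1 = none ∨ r.2.1 = some stage) then acc + r.2.2 else acc) 0
              new_entries ++ [(pe.1, max 0 (pe.2 - total_reduction))]) []))) =
      (fun adjusted cell => adjusted.insert (cell.1, cell.2.1)
        (cell.2.2.map (fun es => es.map (fun e => (e.1, max 0 (e.2 - pvTotal cell.1 e.1 rs)))))) := by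
    funext adjusted cell
    obtain ⟨st, at_, oe⟩ := cell
    cases oe with
    | none => rfl
    | some es =>
        simp only [Option.map_some]
        congr 3
        rw [PySem.List.foldl_append_singleton_eq_map]
        apply List.map_congr_left
        intro e _
        rw [pv_foldl_if_total st e.1 rs 0]
        simp
  rw [hbody]
  have hitems := PySem.Dict.items_foldl_insert_fresh mapping
      (fun c => (c.1, c.2.1))
      (fun cell => cell.2.2.map (fun es => es.map (fun e => (e.1, max 0 (e.2 - pvTotal cell.1 e.1 rs)))))
      PySem.Dict.empty (fun a _ => by simp [PySem.Dict.contains_empty]) hnd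
  rw [hitems]
  simp [PySem.Dict.empty, List.map_map]

-- ===== VERDICT (by name: the statement is the Claim_ definition above) =====
theorem apply_reductions_spec : Claim_equal_apply_reductions := by
  intro mapping reductions _ hpre
  unfold Spec_apply_reductions
  rw [pv_a_eq_map mapping reductions hpre, pv_alt_eq_map]
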